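-- pv_equiv track=rewrite | github.com/cannmirror/ops-transformer | mc2/matmul_reduce_scatter_v2/tests/assets/golden.py | fetch_batch_broadcast
-- ===== SOURCE A (Python) =====
-- def fetch_batch_broadcast(batch_x1, batch_x2):
--     import copy
--     batch_out = copy.deepcopy(batch_x1) if len(batch_x1) > len(batch_x2) else copy.deepcopy(batch_x2)
--
--     min_len, max_len = 0, 0
--     if batch_x2 != batch_x1 and batch_x1 and batch_x2:
--         min_len = min(len(batch_x1), len(batch_x2))
--         max_len = max(len(batch_x1), len(batch_x2))
--
--     for idx in range(min_len):
--         batch_out[-(idx + 1)] = max(batch_x1[-(idx + 1)], batch_x2[-(idx + 1)])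
--
--     if len(batch_x1) > len(batch_x2):
--         for idx in range(min_len, max_len):
--             batch_out[-(idx + 1)] = batch_x1[-(idx + 1)]
--     else:
--         for idx in range(min_len, max_len):
--             batch_out[-(idx + 1)] = batch_x2[-(idx + 1)]
--     return batch_out
-- ===== SOURCE B (Python) =====
-- def _zip_tail_max(r1, r2):
--     # both inputs are reversed batch lists; recurse over the structure
--     if not r1:
--         return list(r2)
--     if not r2:
--         return list(r1)
--     return [max(r1[0], r2[0])] + _zip_tail_max(r1[1:], r2[1:])
--
--
-- def fetch_batch_broadcast(batch_x1, batch_x2):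
--     out = _zip_tail_max(batch_x1[::-1], batch_x2[::-1])
--     out.reverse()
--     return out
-- ===== Notes on version B (the rewrite author's own statement) =====
-- stated objective: simpler
-- what changed: Replaces deepcopy-then-three-mutating-index-loops with a single structural recursion that zips the two reversed lists with max (tail-aligned), padding with the longer list, then reverses the result.
import Mathlib
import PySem

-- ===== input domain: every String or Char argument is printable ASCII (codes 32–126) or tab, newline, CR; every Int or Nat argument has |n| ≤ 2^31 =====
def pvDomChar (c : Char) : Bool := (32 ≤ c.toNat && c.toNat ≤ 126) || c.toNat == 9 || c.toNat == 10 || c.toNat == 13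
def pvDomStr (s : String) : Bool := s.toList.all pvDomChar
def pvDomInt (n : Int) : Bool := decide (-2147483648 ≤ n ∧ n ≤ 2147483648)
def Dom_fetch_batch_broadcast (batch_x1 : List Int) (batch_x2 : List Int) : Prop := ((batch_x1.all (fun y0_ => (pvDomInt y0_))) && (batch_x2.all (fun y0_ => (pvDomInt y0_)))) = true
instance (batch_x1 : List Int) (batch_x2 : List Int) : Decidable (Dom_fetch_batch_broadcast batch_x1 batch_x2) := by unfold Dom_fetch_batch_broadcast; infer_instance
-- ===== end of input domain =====

-- B replaces A's deepcopy-then-three-mutating-index-loops by one structural recursion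
-- zipping the two reversed lists with max and padding with the longer list (simpler).

-- ===== PORT A =====
-- xs[-(idx+1)] read: in A's loops idx+1 ≤ len(xs) always holds, so the negative index
-- resolves to len-(idx+1) and never raises; the default 0 is never used.
def aGet (xs : List Int) (idx : Nat) : Int := xs.getD (xs.length - (idx + 1)) 0
-- xs[-(idx+1)] = v: same in-range remark; List.set at that position.
def aSet (xs : List Int) (idx : Nat) (v : Int) : List Int := xs.set (xs.length - (idx + 1)) v

def fetch_batch_broadcast (batch_x1 : List Int) (batch_x2 : List Int) : List Int :=
  -- copy.deepcopy of a list of ints = the same value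
  let batch_out := if batch_x1.length > batch_x2.length then batch_x1 else batch_x2
  -- min_len, max_len = 0, 0, conditionally reassigned
  let mm : Nat × Nat :=
    if batch_x2 ≠ batch_x1 ∧ batch_x1 ≠ [] ∧ batch_x2 ≠ [] then
      (min batch_x1.length batch_x2.length, max batch_x1.length batch_x2.length)
    else (0, 0)
  let min_len := mm.1
  let max_len := mm.2
  -- for idx in range(min_len): batch_out[-(idx+1)] = max(batch_x1[-(idx+1)], batch_x2[-(idx+1)])
  let batch_out := (List.range min_len).foldl
    (fun out idx => aSet out idx (max (aGet batch_x1 idx) (aGet batch_x2 idx))) batch_out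
  if batch_x1.length > batch_x2.length then
    (List.range' min_len (max_len - min_len)).foldl
      (fun out idx => aSet out idx (aGet batch_x1 idx)) batch_out
  else
    (List.range' min_len (max_len - min_len)).foldl
      (fun out idx => aSet out idx (aGet batch_x2 idx)) batch_out

-- ===== PORT B =====
-- _zip_tail_max on the reversed lists: empty side → the other list, else max of heads.
def zipTailMax : List Int → List Int → List Int
  | [], r2 => r2
  | r1, [] => r1
  | a :: as, b :: bs => max a b :: zipTailMax as bs

def fetch_batch_broadcast_alt (batch_x1 : List Int) (batch_x2 : List Int) : List Int :=
  (zipTailMax batch_x1.reverse batch_x2.reverse).reverse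

-- ===== PRECONDITION & SPEC =====
def Spec_fetch_batch_broadcast (batch_x1 : List Int) (batch_x2 : List Int) (out : List Int) : Prop := out = fetch_batch_broadcast_alt batch_x1 batch_x2
instance (batch_x1 : List Int) (batch_x2 : List Int) (out : List Int) : Decidable (Spec_fetch_batch_broadcast batch_x1 batch_x2 out) := by unfold Spec_fetch_batch_broadcast; infer_instance

-- ===== CLAIM (what is proved, stated in full; the proofs are below) =====
def Claim_equal_fetch_batch_broadcast : Prop := ∀ (batch_x1 : List Int) (batch_x2 : List Int), Dom_fetch_batch_broadcast batch_x1 batch_x2 → Spec_fetch_batch_broadcast batch_x1 batch_x2 (fetch_batch_broadcast batch_x1 batch_x2)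

-- ===== LEMMAS AND PROOFS =====

theorem zt_nil_left (r : List Int) : zipTailMax [] r = r := by cases r <;> rfl

theorem zt_nil_right (r : List Int) : zipTailMax r [] = r := by cases r <;> rfl

theorem zt_self (r : List Int) : zipTailMax r r = r := by
  induction r with
  | nil => rfl
  | cons a t ih => simp [zipTailMax, ih]

theorem zt_length (a b : List Int) : (zipTailMax a b).length = max a.length b.length := by
  induction a generalizing b with
  | nil => simp [zt_nil_left]
  | cons x xs ih =>
    cases b with
    | nil => simp [zipTailMax]
    | cons y ys => simp [zipTailMax, ih]

theorem zt_get (a b : List Int) (j : Nat) :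
    (zipTailMax a b)[j]? =
      if j < a.length ∧ j < b.length then some (max (a.getD j 0) (b.getD j 0))
      else if j < a.length then a[j]? else b[j]? := by
  induction a generalizing b j with
  | nil => simp [zt_nil_left]
  | cons x xs ih =>
    cases b with
    | nil =>
      rw [zt_nil_right]
      by_cases h : j < (x :: xs).length
      · rw [if_neg (by simp), if_pos h]
      · rw [if_neg (by simp), if_neg h]
        simp [List.getElem?_eq_none (Nat.le_of_not_lt h)]
    | cons y ys =>
      cases j with
      | zero => simp [zipTailMax, List.getD]
      | succ j =>
        simp only [zipTailMax, List.getElem?_cons_succ, ih, List.length_cons,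
          List.getD_cons_succ, Nat.add_lt_add_iff_right]

theorem loop_set (v : Nat → Int) (idxs : List Nat) (out : List Int)
    (hlt : ∀ i ∈ idxs, i < out.length) :
    (idxs.foldl (fun o i => aSet o i (v i)) out).length = out.length ∧
    ∀ k, (idxs.foldl (fun o i => aSet o i (v i)) out)[k]? =
      if k < out.length ∧ (out.length - 1 - k) ∈ idxs ∧ out.length - 1 - k < out.length
      then some (v (out.length - 1 - k)) else out[k]? := by
  induction idxs generalizing out with
  | nil => simp
  | cons i t ih =>
    have hi : i < out.length := hlt i (List.mem_cons_self)
    have hlen : (aSet out i (v i)).length = out.length := by simp [aSet]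
    obtain ⟨ihlen, ihget⟩ := ih (aSet out i (v i))
      (by intro j hj; rw [hlen]; exact hlt j (List.mem_cons_of_mem _ hj))
    refine ⟨by rw [List.foldl_cons, ihlen, hlen], ?_⟩
    intro k
    rw [List.foldl_cons, ihget k, hlen]
    by_cases h1 : k < out.length ∧ out.length - 1 - k ∈ t ∧ out.length - 1 - k < out.length
    · rw [if_pos h1, if_pos ⟨h1.1, List.mem_cons_of_mem _ h1.2.1, h1.2.2⟩]
    · rw [if_neg h1]
      by_cases h2 : k = out.length - (i + 1)
      · subst h2
        have hji : out.length - 1 - (out.length - (i + 1)) = i := by omega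
        rw [if_pos ⟨by omega, by rw [hji]; exact ⟨List.mem_cons_self, hi⟩⟩]
        rw [hji]
        simp [aSet, List.getElem?_set_self (by omega : out.length - (i+1) < out.length)]
      · have hne : out.length - (i + 1) ≠ k := fun h => h2 h.symm
        have hset : (aSet out i (v i))[k]? = out[k]? := by
          simp [aSet, List.getElem?_set_ne hne]
        rw [hset]
        rw [if_neg]
        intro ⟨hk, hmem, hlt2⟩
        rcases List.mem_cons.mp hmem with h | h
        · exact h2 (by omega)
        · exact h1 ⟨hk, h, hlt2⟩

theorem rev_get (xs : List Int) (j : Nat) (h : j < xs.length) :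
    xs.reverse[j]? = xs[xs.length - 1 - j]? := by
  rw [List.getElem?_reverse (by simpa using h)]

theorem getD_some (xs : List Int) (k : Nat) (h : k < xs.length) :
    xs[k]? = some (xs.getD k 0) := by
  rw [List.getElem?_eq_getElem h, List.getD_eq_getElem?_getD, List.getElem?_eq_getElem h]
  rfl

theorem rev_getD (xs : List Int) (j : Nat) (h : j < xs.length) :
    xs.reverse.getD j 0 = xs.getD (xs.length - 1 - j) 0 := by
  rw [List.getD_eq_getElem?_getD, rev_get xs j h, ← List.getD_eq_getElem?_getD]

theorem core_get (a : List Int) (v : Nat → Int) (m : Nat) (hm : m ≤ a.length) (k : Nat) :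
    ((List.range' m (a.length - m)).foldl (fun out idx => aSet out idx (aGet a idx))
      ((List.range m).foldl (fun out idx => aSet out idx (v idx)) a))[k]? =
    if a.length - m ≤ k ∧ k < a.length then some (v (a.length - 1 - k)) else a[k]? := by
  obtain ⟨hilen, higet⟩ := loop_set v (List.range m) a
    (by intro i hi; have := List.mem_range.mp hi; omega)
  obtain ⟨holen, hoget⟩ := loop_set (fun i => aGet a i)
    (List.range' m (a.length - m))
    ((List.range m).foldl (fun out idx => aSet out idx (v idx)) a)
    (by intro i hi
        have := (List.mem_range'_1.mp hi).2
        rw [hilen]; omega)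
  rw [hoget k, hilen]
  by_cases hk : k < a.length
  · by_cases hj : a.length - 1 - k < m
    · -- tail region: the range' loop does not touch k, the range loop wrote max there
      rw [if_neg (by
        rintro ⟨-, hmem, -⟩
        have := (List.mem_range'_1.mp hmem).1
        omega)]
      rw [higet k, if_pos ⟨hk, List.mem_range.mpr hj, by omega⟩,
        if_pos (by constructor <;> omega)]
    · -- front region: the range' loop rewrites position k with a's own value
      rw [if_pos ⟨hk, List.mem_range'_1.mpr (by constructor <;> omega), by omega⟩,
        if_neg (by omega)]
      have e : a.length - (a.length - 1 - k + 1) = k := by omega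
      show some (a.getD (a.length - (a.length - 1 - k + 1)) 0) = a[k]?
      rw [e, getD_some a k hk]
  · rw [if_neg (by omega), if_neg (by omega), higet k, if_neg (by omega)]

theorem alt_get_gt (x1 x2 : List Int) (hl : x2.length < x1.length) (k : Nat) :
    (fetch_batch_broadcast_alt x1 x2)[k]? =
      if x1.length - x2.length ≤ k ∧ k < x1.length then
        some (max (x1.getD (x1.length - 1 - (x1.length - 1 - k)) 0)
                  (x2.getD (x2.length - 1 - (x1.length - 1 - k)) 0))
      else x1[k]? := by
  have hzl : (zipTailMax x1.reverse x2.reverse).length = x1.length := by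
    rw [zt_length]; simp; omega
  by_cases hk : k < x1.length
  · have hrev : (fetch_batch_broadcast_alt x1 x2)[k]? =
        (zipTailMax x1.reverse x2.reverse)[x1.length - 1 - k]? := by
      unfold fetch_batch_broadcast_alt
      rw [rev_get _ k (by rw [hzl]; exact hk), hzl]
    rw [hrev, zt_get]
    simp only [List.length_reverse]
    by_cases hj : x1.length - 1 - k < x2.length
    · rw [if_pos ⟨by omega, hj⟩, if_pos (by omega)]
      rw [rev_getD x1 _ (by omega), rev_getD x2 _ hj]
    · rw [if_neg (fun h => hj h.2), if_pos (by omega), if_neg (by omega),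
        rev_get x1 _ (by omega)]
      have e : x1.length - 1 - (x1.length - 1 - k) = k := by omega
      rw [e]
  · rw [if_neg (by omega)]
    have h1 : (fetch_batch_broadcast_alt x1 x2)[k]? = none := by
      apply List.getElem?_eq_none
      unfold fetch_batch_broadcast_alt
      rw [List.length_reverse, hzl]; omega
    rw [h1, List.getElem?_eq_none (by omega)]

theorem alt_get_le (x1 x2 : List Int) (hl : x1.length ≤ x2.length) (k : Nat) :
    (fetch_batch_broadcast_alt x1 x2)[k]? =
      if x2.length - x1.length ≤ k ∧ k < x2.length then
        some (max (x1.getD (x1.length - 1 - (x2.length - 1 - k)) 0)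
                  (x2.getD (x2.length - 1 - (x2.length - 1 - k)) 0))
      else x2[k]? := by
  have hzl : (zipTailMax x1.reverse x2.reverse).length = x2.length := by
    rw [zt_length]; simp; omega
  by_cases hk : k < x2.length
  · have hrev : (fetch_batch_broadcast_alt x1 x2)[k]? =
        (zipTailMax x1.reverse x2.reverse)[x2.length - 1 - k]? := by
      unfold fetch_batch_broadcast_alt
      rw [rev_get _ k (by rw [hzl]; exact hk), hzl]
    rw [hrev, zt_get]
    simp only [List.length_reverse]
    by_cases hj : x2.length - 1 - k < x1.length
    · rw [if_pos ⟨hj, by omega⟩, if_pos (by omega)]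
      rw [rev_getD x1 _ hj, rev_getD x2 _ (by omega)]
    · rw [if_neg (fun h => hj h.1), if_neg hj, if_neg (by omega),
        rev_get x2 _ (by omega)]
      have e : x2.length - 1 - (x2.length - 1 - k) = k := by omega
      rw [e]
  · rw [if_neg (by omega)]
    have h1 : (fetch_batch_broadcast_alt x1 x2)[k]? = none := by
      apply List.getElem?_eq_none
      unfold fetch_batch_broadcast_alt
      rw [List.length_reverse, hzl]; omega
    rw [h1, List.getElem?_eq_none (by omega)]

theorem main_eq (x1 x2 : List Int) :
    fetch_batch_broadcast x1 x2 = fetch_batch_broadcast_alt x1 x2 := by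
  by_cases hc : x2 ≠ x1 ∧ x1 ≠ [] ∧ x2 ≠ []
  · by_cases hl : x1.length > x2.length
    · have hA : fetch_batch_broadcast x1 x2 =
          (List.range' x2.length (x1.length - x2.length)).foldl
            (fun out idx => aSet out idx (aGet x1 idx))
            ((List.range x2.length).foldl
              (fun out idx => aSet out idx (max (aGet x1 idx) (aGet x2 idx))) x1) := by
        simp [fetch_batch_broadcast, hc, hl,
          Nat.min_eq_right (by omega : x2.length ≤ x1.length),
          Nat.max_eq_left (by omega : x2.length ≤ x1.length)]
      apply List.ext_getElem?
      intro k
      rw [hA, core_get x1 (fun i => max (aGet x1 i) (aGet x2 i)) x2.length (by omega) k,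
        alt_get_gt x1 x2 hl k]
      by_cases hr : x1.length - x2.length ≤ k ∧ k < x1.length
      · rw [if_pos hr, if_pos hr]
        show some (max (x1.getD (x1.length - (x1.length - 1 - k + 1)) 0)
          (x2.getD (x2.length - (x1.length - 1 - k + 1)) 0)) = _
        have e1 : x1.length - (x1.length - 1 - k + 1) = x1.length - 1 - (x1.length - 1 - k) := by
          omega
        have e2 : x2.length - (x1.length - 1 - k + 1) = x2.length - 1 - (x1.length - 1 - k) := by
          omega
        rw [e1, e2]
      · rw [if_neg hr, if_neg hr]
    · have hA : fetch_batch_broadcast x1 x2 =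
          (List.range' x1.length (x2.length - x1.length)).foldl
            (fun out idx => aSet out idx (aGet x2 idx))
            ((List.range x1.length).foldl
              (fun out idx => aSet out idx (max (aGet x1 idx) (aGet x2 idx))) x2) := by
        simp [fetch_batch_broadcast, hc, hl,
          Nat.min_eq_left (by omega : x1.length ≤ x2.length),
          Nat.max_eq_right (by omega : x1.length ≤ x2.length)]
      apply List.ext_getElem?
      intro k
      rw [hA, core_get x2 (fun i => max (aGet x1 i) (aGet x2 i)) x1.length (by omega) k,
        alt_get_le x1 x2 (by omega) k]
      by_cases hr : x2.length - x1.length ≤ k ∧ k < x2.length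
      · rw [if_pos hr, if_pos hr]
        show some (max (x1.getD (x1.length - (x2.length - 1 - k + 1)) 0)
          (x2.getD (x2.length - (x2.length - 1 - k + 1)) 0)) = _
        have e1 : x1.length - (x2.length - 1 - k + 1) = x1.length - 1 - (x2.length - 1 - k) := by
          omega
        have e2 : x2.length - (x2.length - 1 - k + 1) = x2.length - 1 - (x2.length - 1 - k) := by
          omega
        rw [e1, e2]
      · rw [if_neg hr, if_neg hr]
  · -- degenerate cases: the loops are empty, A returns the deep copy of the chosen list
    have hA : fetch_batch_broadcast x1 x2 =
        if x1.length > x2.length then x1 else x2 := by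
      simp [fetch_batch_broadcast, hc]
    rw [not_and_or, not_and_or, not_not, not_not, not_not] at hc
    rcases hc with h | h | h
    · subst h
      rw [hA, ite_self]
      simp [fetch_batch_broadcast_alt, zt_self]
    · subst h
      rw [hA, if_neg (by simp)]
      simp [fetch_batch_broadcast_alt, zt_nil_left]
    · subst h
      cases x1 with
      | nil => rw [hA]; simp [fetch_batch_broadcast_alt, zipTailMax]
      | cons a t =>
        rw [hA, if_pos (by simp)]
        simp [fetch_batch_broadcast_alt, zt_nil_right]

-- ===== VERDICT (by name: the statement is the Claim_ definition above) =====
theorem fetch_batch_broadcast_spec : Claim_equal_fetch_batch_broadcast := by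
  intro x1 x2 _
  exact main_eq x1 x2
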